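-- pv_equiv track=rewrite | github.com/jiportilla/ontology | python/nlusvc/core/dmo/cased_term_extraction.py | _subsumes
-- ===== SOURCE A (Python) =====
-- def _subsumes(some_patterns: list) -> list:
--     s = set(some_patterns)
--     eliminate = set()
--
--     for p1 in some_patterns:
--         for p2 in some_patterns:
--             if p1 == p2:
--                 continue
--             if p1 in p2:
--                 eliminate.add(p1)
--             elif p2 in p1:
--                 eliminate.add(p2)
--
--     return sorted(s.difference(eliminate))
-- ===== SOURCE B (Python) =====
-- def _subsumes(some_patterns: list) -> list:
--     # Enumerate every substring of every pattern once (hash set), instead of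
--     # comparing all pattern pairs: a pattern survives iff it is not a
--     # substring of some *different* pattern.
--     banned = set()
--     for q in some_patterns:
--         n = len(q)
--         for i in range(n):
--             for j in range(i, n + 1):
--                 sub = q[i:j]
--                 if sub != q:
--                     banned.add(sub)
--     return sorted(p for p in set(some_patterns) if p not in banned)
-- ===== Notes on version B (the rewrite author's own statement) =====
-- stated objective: faster
-- what changed: Replaces A's all-pairs 'p1 in p2' comparisons by a single pass that enumerates every substring of every pattern into one hash set and keeps the patterns not found in it.
import Mathlib
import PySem

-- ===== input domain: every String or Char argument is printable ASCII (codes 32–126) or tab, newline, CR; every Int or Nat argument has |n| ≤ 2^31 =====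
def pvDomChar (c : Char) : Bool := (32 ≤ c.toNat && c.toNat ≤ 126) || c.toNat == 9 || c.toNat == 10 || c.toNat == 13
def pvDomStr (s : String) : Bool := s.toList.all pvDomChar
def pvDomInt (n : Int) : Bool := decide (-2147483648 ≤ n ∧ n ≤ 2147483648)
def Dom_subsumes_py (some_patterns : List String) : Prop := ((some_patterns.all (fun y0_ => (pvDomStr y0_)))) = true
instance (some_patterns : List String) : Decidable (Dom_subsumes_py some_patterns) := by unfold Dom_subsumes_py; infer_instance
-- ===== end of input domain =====

-- B replaces A's all-pairs substring tests by enumerating, once per pattern, every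
-- substring into one hash set ('banned') and keeping the patterns not in it (alternative decomposition).

-- ===== PORT A =====
def subsumes_py (some_patterns : List String) : List String :=
  let s := PySem.Set.ofList some_patterns
  let eliminate := some_patterns.foldl (fun elim p1 =>
    some_patterns.foldl (fun elim p2 =>
      if p1 == p2 then elim
      else if PySem.Str.isIn p1 p2 then PySem.Set.add elim p1
      else if PySem.Str.isIn p2 p1 then PySem.Set.add elim p2
      else elim) elim) PySem.Set.empty
  PySem.List.sorted (PySem.Set.diff s eliminate) (fun x => x) false

-- ===== PORT B =====
-- one pattern's contribution to 'banned': all slices q[i:j] (i in range(n), j in range(i, n+1)) other than q itself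
def pvBannedOf (banned : PySem.Set String) (q : String) : PySem.Set String :=
  (PySem.List.pyRange 0 (PySem.Str.len q) 1).foldl (fun b i =>
    (PySem.List.pyRange i (PySem.Str.len q + 1) 1).foldl (fun b j =>
      let sub := PySem.Str.slice q (some i) (some j)
      if sub == q then b else PySem.Set.add b sub) b) banned

def subsumes_py_alt (some_patterns : List String) : List String :=
  let banned := some_patterns.foldl pvBannedOf PySem.Set.empty
  PySem.List.sorted ((PySem.Set.ofList some_patterns).filter
      (fun p => !(PySem.Set.contains banned p))) (fun x => x) false

-- ===== PRECONDITION & SPEC =====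
def Spec_subsumes_py (some_patterns : List String) (out : List String) : Prop := out = subsumes_py_alt some_patterns
instance (some_patterns : List String) (out : List String) : Decidable (Spec_subsumes_py some_patterns out) := by unfold Spec_subsumes_py; infer_instance

-- ===== CLAIM (what is proved, stated in full; the proofs are below) =====
def Claim_equal_subsumes_py : Prop := ∀ (some_patterns : List String), Dom_subsumes_py some_patterns → Spec_subsumes_py some_patterns (subsumes_py some_patterns)

-- ===== LEMMAS AND PROOFS =====

-- membership through a fold whose step adds elements to a PySem.Set
theorem pv_mem_foldl_iff {A B : Type} [BEq B] [LawfulBEq B]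
    (h : PySem.Set B → A → PySem.Set B) (P : A → Prop) (x : B)
    (hstep : ∀ b i, x ∈ h b i ↔ x ∈ b ∨ P i) :
    ∀ (l : List A) (s : PySem.Set B), x ∈ l.foldl h s ↔ x ∈ s ∨ ∃ i ∈ l, P i := by
  intro l
  induction l with
  | nil => simp
  | cons a t ih =>
    intro s
    simp only [List.foldl_cons, ih, hstep, List.mem_cons]
    constructor
    · rintro ((h | h) | ⟨i, hi, hp⟩)
      · exact Or.inl h
      · exact Or.inr ⟨a, Or.inl rfl, h⟩
      · exact Or.inr ⟨i, Or.inr hi, hp⟩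
    · rintro (h | ⟨i, rfl | hi, hp⟩)
      · exact Or.inl (Or.inl h)
      · exact Or.inl (Or.inr hp)
      · exact Or.inr ⟨i, hi, hp⟩

-- the condition under which A's inner loop (fixed p1, current p2) records x
def pvC (x p1 p2 : String) : Prop :=
  p1 ≠ p2 ∧ ((PySem.Str.isIn p1 p2 = true ∧ x = p1) ∨
    (PySem.Str.isIn p1 p2 = false ∧ PySem.Str.isIn p2 p1 = true ∧ x = p2))

-- "x is a proper substring of some pattern in L"
def pvBad (L : List String) (x : String) : Prop :=
  ∃ q ∈ L, x ≠ q ∧ x.toList <:+: q.toList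

theorem pv_take_drop_infix {A : Type} (m : List A) (i j : Nat) :
    (m.drop i).take j <:+: m :=
  ((List.take_prefix j (m.drop i)).isInfix).trans (List.drop_suffix i m).isInfix

-- A's eliminate set contains exactly the patterns that are proper substrings of another pattern
theorem pv_mem_eliminate (L : List String) (x : String) :
    (x ∈ L.foldl (fun elim p1 =>
      L.foldl (fun elim p2 =>
        if p1 == p2 then elim
        else if PySem.Str.isIn p1 p2 then PySem.Set.add elim p1
        else if PySem.Str.isIn p2 p1 then PySem.Set.add elim p2
        else elim) elim) PySem.Set.empty) ↔ (x ∈ L ∧ pvBad L x) := by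
  rw [pv_mem_foldl_iff _ (fun p1 => ∃ p2 ∈ L, pvC x p1 p2) x (fun b p1 => by
    rw [pv_mem_foldl_iff _ (pvC x p1) x (fun b' p2 => by
      unfold pvC
      split_ifs with h1 h2 h3 <;>
        simp_all [PySem.Set.mem_add]) L b])]
  constructor
  · rintro (h | ⟨p1, hp1, p2, hp2, hne, ⟨hin, rfl⟩ | ⟨_, hin, rfl⟩⟩)
    · simp [PySem.Set.empty] at h
    · exact ⟨hp1, p2, hp2, hne, (PySem.Str.isIn_iff_infix _ _).mp hin⟩
    · exact ⟨hp2, p1, hp1, Ne.symm hne, (PySem.Str.isIn_iff_infix _ _).mp hin⟩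
  · rintro ⟨hx, q, hq, hne, hinf⟩
    exact Or.inr ⟨x, hx, q, hq, hne, Or.inl ⟨(PySem.Str.isIn_iff_infix _ _).mpr hinf, rfl⟩⟩

-- B's per-pattern slice enumeration contributes exactly the proper substrings of q
theorem pv_mem_bannedOf (b : PySem.Set String) (q x : String) :
    x ∈ pvBannedOf b q ↔ x ∈ b ∨ (x ≠ q ∧ x.toList <:+: q.toList) := by
  unfold pvBannedOf
  rw [pv_mem_foldl_iff _
    (fun i => ∃ j ∈ PySem.List.pyRange i (PySem.Str.len q + 1) 1,
        ¬(PySem.Str.slice q (some i) (some j) = q) ∧ x = PySem.Str.slice q (some i) (some j)) x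
    (fun b' i => by
      rw [pv_mem_foldl_iff _
        (fun j => ¬(PySem.Str.slice q (some i) (some j) = q) ∧
            x = PySem.Str.slice q (some i) (some j)) x
        (fun b'' j => by
          simp only []
          split_ifs with h <;> simp_all [PySem.Set.mem_add])])]
  refine or_congr_right ?_
  constructor
  · rintro ⟨i, hi, j, hj, hne, rfl⟩
    rw [PySem.List.mem_pyRange_iff_of_pos (by norm_num)] at hi hj
    obtain ⟨hi0, _, _⟩ := hi
    obtain ⟨hij, _, _⟩ := hj
    refine ⟨hne, ?_⟩
    rw [PySem.Str.toList_slice, PySem.Chars.slice_eq_listSlice,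
      PySem.List.slice_toNat _ hi0 (le_trans hi0 hij)]
    exact pv_take_drop_infix _ _ _
  · rintro ⟨hne, hinf⟩
    obtain ⟨spre, t, hst⟩ := hinf
    have hn : q.toList.length = spre.length + x.toList.length + t.length := by
      rw [← hst]; simp; omega
    have hxlt : x.toList.length < q.toList.length := by
      rcases Nat.lt_or_ge x.toList.length q.toList.length with h | h
      · exact h
      · exfalso
        have hs0 : spre.length = 0 ∧ t.length = 0 := by omega
        apply hne
        rw [← String.toList_inj, ← hst, List.eq_nil_of_length_eq_zero hs0.1,
          List.eq_nil_of_length_eq_zero hs0.2]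
        simp
    by_cases hx0 : x.toList.length = 0
    · -- x is the empty string: take i = j = 0
      refine ⟨0, ?_, 0, ?_, ?_, ?_⟩
      · rw [PySem.List.mem_pyRange_iff_of_pos (by norm_num), PySem.Str.len_eq]
        refine ⟨le_refl _, ?_, by simp⟩
        exact_mod_cast by omega
      · rw [PySem.List.mem_pyRange_iff_of_pos (by norm_num), PySem.Str.len_eq]
        exact ⟨le_refl _, by omega, by simp⟩
      · intro hcontra
        apply hne
        rw [← String.toList_inj, ← hcontra, PySem.Str.toList_slice,
          PySem.Chars.slice_eq_listSlice, PySem.List.slice_toNat _ (le_refl 0) (le_refl 0)]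
        simp [List.eq_nil_of_length_eq_zero hx0]
      · rw [← String.toList_inj, PySem.Str.toList_slice, PySem.Chars.slice_eq_listSlice,
          PySem.List.slice_toNat _ (le_refl 0) (le_refl 0)]
        simp [List.eq_nil_of_length_eq_zero hx0]
    · -- x nonempty: i = |spre|, j = i + |x|
      refine ⟨(spre.length : Int), ?_, ((spre.length + x.toList.length : Nat) : Int), ?_, ?_, ?_⟩
      · rw [PySem.List.mem_pyRange_iff_of_pos (by norm_num), PySem.Str.len_eq]
        refine ⟨by positivity, ?_, by simp⟩
        exact_mod_cast by omega
      · rw [PySem.List.mem_pyRange_iff_of_pos (by norm_num), PySem.Str.len_eq]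
        refine ⟨by exact_mod_cast by omega, ?_, by simp⟩
        exact_mod_cast by omega
      all_goals
        have hslice : (PySem.Str.slice q (some (spre.length : Int))
            (some ((spre.length + x.toList.length : Nat) : Int))).toList = x.toList := by
          rw [PySem.Str.toList_slice, PySem.Chars.slice_eq_listSlice,
            PySem.List.slice_toNat _ (by positivity) (by positivity)]
          simp only [Int.toNat_natCast]
          rw [← hst, Nat.add_sub_cancel_left, List.append_assoc, List.drop_left,
            List.take_left]
      · intro hcontra
        apply hne
        rw [← String.toList_inj, ← hslice, hcontra]
      · rw [← String.toList_inj, hslice]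

-- the whole banned set = proper substrings of any pattern
theorem pv_mem_banned (L : List String) (x : String) :
    x ∈ L.foldl pvBannedOf PySem.Set.empty ↔ pvBad L x := by
  rw [pv_mem_foldl_iff pvBannedOf
    (fun q => x ≠ q ∧ x.toList <:+: q.toList) x (fun b q => pv_mem_bannedOf b q x)]
  unfold pvBad
  simp [PySem.Set.empty]

-- ===== VERDICT (by name: the statement is the Claim_ definition above) =====
theorem subsumes_py_spec : Claim_equal_subsumes_py := by
  intro L _
  unfold Spec_subsumes_py subsumes_py subsumes_py_alt
  dsimp only []
  have hfilter : PySem.Set.diff (PySem.Set.ofList L)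
      (L.foldl (fun elim p1 =>
        L.foldl (fun elim p2 =>
          if p1 == p2 then elim
          else if PySem.Str.isIn p1 p2 then PySem.Set.add elim p1
          else if PySem.Str.isIn p2 p1 then PySem.Set.add elim p2
          else elim) elim) PySem.Set.empty) =
      (PySem.Set.ofList L).filter
        (fun p => !(PySem.Set.contains (L.foldl pvBannedOf PySem.Set.empty) p)) := by
    rw [show ∀ (s t : PySem.Set String), PySem.Set.diff s t =
        s.filter (fun x => !(PySem.Set.contains t x)) from fun _ _ => rfl]
    apply List.filter_congr
    intro x hx
    rw [PySem.Set.mem_ofList] at hx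
    congr 1
    rw [Bool.eq_iff_iff, PySem.Set.contains_iff, PySem.Set.contains_iff,
      pv_mem_eliminate, pv_mem_banned]
    tauto
  rw [hfilter]
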